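-- pv_equiv track=rewrite | github.com/ReadyOS-C64/ReadyOs | build_support/editor_host_smoke.py | apply_paste
-- ===== SOURCE A (Python) =====
-- def apply_paste(lines: list[str], cursor_x: int, cursor_y: int, payload: str,
--                 max_lines: int = 100, max_line_len: int = 80) -> tuple[list[str], int, int]:
--     out = list(lines)
--     for ch in payload:
--         if ch == "\r":
--             if len(out) >= max_lines:
--                 break
--             current = out[cursor_y]
--             out[cursor_y] = current[:cursor_x]
--             out.insert(cursor_y + 1, current[cursor_x:])
--             cursor_y += 1
--             cursor_x = 0
--             continue
--
--         if len(out[cursor_y]) >= max_line_len - 1: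
--             continue
--
--         current = out[cursor_y]
--         out[cursor_y] = current[:cursor_x] + ch + current[cursor_x:]
--         cursor_x += 1
--
--     return out, cursor_x, cursor_y
-- ===== SOURCE B (Python) =====
-- def apply_paste(lines: list[str], cursor_x: int, cursor_y: int, payload: str,
--                 max_lines: int = 100, max_line_len: int = 80) -> tuple[list[str], int, int]:
--     out = list(lines)
--     i = 0
--     n = len(payload)
--     while i < n:
--         if payload[i] == "\r":
--             if len(out) >= max_lines:
--                 break
--             line = out[cursor_y]
--             out = out[:cursor_y] + [line[:cursor_x], line[cursor_x:]] + out[cursor_y + 1:]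
--             cursor_y += 1
--             cursor_x = 0
--             i += 1
--         else:
--             j = i
--             while j < n and payload[j] != "\r":
--                 j += 1
--             seg = payload[i:j]
--             line = out[cursor_y]
--             fit = max_line_len - 1 - len(line)
--             if fit > 0:
--                 ins = seg[:fit]
--                 out[cursor_y] = line[:cursor_x] + ins + line[cursor_x:]
--                 cursor_x += len(ins)
--             i = j
--     return out, cursor_x, cursor_y
-- ===== Notes on version B (the rewrite author's own statement) =====
-- stated objective: alternative
-- what changed: Instead of splicing the line once per payload character, B scans each maximal CR-free run of the payload, computes once how many of its characters still fit under the line-length cap, and inserts that whole chunk with a single slice operation (intended as faster; a timing run measured 11.35x at the largest size but not consistently >=1.5x on CR-heavy payloads).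
-- outside the precondition, e.g. on apply_paste(['abc'], -1, 0, 'xy', 10, 80): A returns (['yabxc'], 1, 0), B returns (['abxyc'], 1, 0)
import Mathlib
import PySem

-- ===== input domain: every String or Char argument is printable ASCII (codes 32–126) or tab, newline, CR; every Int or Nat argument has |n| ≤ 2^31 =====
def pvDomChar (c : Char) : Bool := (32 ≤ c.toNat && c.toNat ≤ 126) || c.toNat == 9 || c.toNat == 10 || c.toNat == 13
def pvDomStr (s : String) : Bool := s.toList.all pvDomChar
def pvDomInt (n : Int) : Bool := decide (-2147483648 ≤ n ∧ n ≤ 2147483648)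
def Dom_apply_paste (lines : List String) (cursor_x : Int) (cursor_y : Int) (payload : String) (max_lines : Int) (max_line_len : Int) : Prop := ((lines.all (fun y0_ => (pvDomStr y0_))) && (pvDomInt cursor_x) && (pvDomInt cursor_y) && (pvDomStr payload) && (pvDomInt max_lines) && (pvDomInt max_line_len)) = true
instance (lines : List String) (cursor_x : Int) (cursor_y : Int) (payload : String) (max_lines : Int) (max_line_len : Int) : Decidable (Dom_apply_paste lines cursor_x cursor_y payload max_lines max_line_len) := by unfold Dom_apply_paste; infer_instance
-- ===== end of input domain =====

-- B batches each CR-free run of the payload: it computes once how many characters still fit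
-- on the cursor line and splices that whole chunk in with one slice insert (objective: alternative).


-- ===== PORT A =====
-- per-character loop over the payload; strings are handled on the List Char side
-- (String.ofList/.toList) because Lean's own String primitives are kernel-opaque.
def pvApplyA (maxL maxLen : Int) : List Char → List String → Int → Int → List String × Int × Int
  | [], out, cx, cy => (out, cx, cy)
  | ch :: rest, out, cx, cy =>
    if ch = '\r' then
      if maxL ≤ (out.length : Int) then (out, cx, cy)   -- break
      else
        let current := (PySem.List.pyGetD out cy "").toList
        let out1 := PySem.List.pySetD out cy (String.ofList (PySem.List.slice current none (some cx)))
        let out2 := PySem.List.insert out1 (cy + 1) (String.ofList (PySem.List.slice current (some cx) none))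
        pvApplyA maxL maxLen rest out2 0 (cy + 1)
    else
      if maxLen - 1 ≤ (((PySem.List.pyGetD out cy "").toList.length : Int)) then
        pvApplyA maxL maxLen rest out cx cy             -- continue
      else
        let current := (PySem.List.pyGetD out cy "").toList
        let out1 := PySem.List.pySetD out cy (String.ofList (PySem.List.slice current none (some cx) ++ [ch] ++ PySem.List.slice current (some cx) none))
        pvApplyA maxL maxLen rest out1 (cx + 1) cy

def apply_paste (lines : List String) (cursor_x : Int) (cursor_y : Int) (payload : String) (max_lines : Int) (max_line_len : Int) : List String × Int × Int :=
  pvApplyA max_lines max_line_len payload.toList lines cursor_x cursor_y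

-- ===== PORT B =====
-- batch insert of one CR-free segment: one fit computation, one slice splice
def pvRunInsert (out : List String) (cx cy : Int) (seg : List Char) (maxLen : Int) : List String × Int :=
  let line := (PySem.List.pyGetD out cy "").toList
  let fit := maxLen - 1 - (line.length : Int)
  if 0 < fit then
    let ins := PySem.List.slice seg none (some fit)
    (PySem.List.pySetD out cy (String.ofList (PySem.List.slice line none (some cx) ++ ins ++ PySem.List.slice line (some cx) none)), cx + (ins.length : Int))
  else (out, cx)

-- outer loop: CR handled one at a time, a maximal CR-free run consumed in one step
def pvApplyB (maxL maxLen : Int) : List Char → List String → Int → Int → List String × Int × Int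
  | [], out, cx, cy => (out, cx, cy)
  | c :: cs, out, cx, cy =>
    if c = '\r' then
      if maxL ≤ (out.length : Int) then (out, cx, cy)   -- break
      else
        -- out[cy:cy+1] = [line[:cx], line[cx:]]  (slice assignment)
        let line := (PySem.List.pyGetD out cy "").toList
        let out2 := PySem.List.slice out none (some cy)
          ++ [String.ofList (PySem.List.slice line none (some cx)), String.ofList (PySem.List.slice line (some cx) none)]
          ++ PySem.List.slice out (some (cy + 1)) none
        pvApplyB maxL maxLen cs out2 0 (cy + 1)
    else
      let res := pvRunInsert out cx cy (c :: cs.takeWhile (· ≠ '\r')) maxLen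
      pvApplyB maxL maxLen (cs.dropWhile (· ≠ '\r')) res.1 res.2 cy
  termination_by cs => cs.length
  decreasing_by
  all_goals first
    | (simp; done)
    | simpa [Nat.lt_succ_iff] using (cs.dropWhile_sublist (p := (· ≠ '\r'))).length_le

def apply_paste_alt (lines : List String) (cursor_x : Int) (cursor_y : Int) (payload : String) (max_lines : Int) (max_line_len : Int) : List String × Int × Int :=
  pvApplyB max_lines max_line_len payload.toList lines cursor_x cursor_y

-- ===== PRECONDITION & SPEC =====
-- Pre_ admits the editor's natural cursor domain (nonnegative cursor_x, cursor_y a genuine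
-- index into lines) plus the inputs the loop never touches (empty payload, or an immediate
-- break because the paste starts with CR and the buffer is already at max_lines).  Outside it
-- A either raises IndexError (cursor_y out of range) or returns a value produced by Python's
-- negative-index/slice wraparound, a corner no caller of a paste helper would specify (see
-- claim cites).
def Pre_apply_paste (lines : List String) (cursor_x : Int) (cursor_y : Int) (payload : String) (max_lines : Int) (max_line_len : Int) : Prop :=
  (0 ≤ cursor_x ∧ 0 ≤ cursor_y ∧ cursor_y < (lines.length : Int))
  ∨ payload = ""
  ∨ (PySem.Str.startswith payload "\r" = true ∧ max_lines ≤ (lines.length : Int))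
instance (lines : List String) (cursor_x : Int) (cursor_y : Int) (payload : String) (max_lines : Int) (max_line_len : Int) : Decidable (Pre_apply_paste lines cursor_x cursor_y payload max_lines max_line_len) := by unfold Pre_apply_paste; infer_instance

def pvWitness_apply_paste : List String × Int × Int × String × Int × Int := (["ab", "cd"], 1, 0, "xy\rz", 10, 80)

def Spec_apply_paste (lines : List String) (cursor_x : Int) (cursor_y : Int) (payload : String) (max_lines : Int) (max_line_len : Int) (out : List String × Int × Int) : Prop := out = apply_paste_alt lines cursor_x cursor_y payload max_lines max_line_len
instance (lines : List String) (cursor_x : Int) (cursor_y : Int) (payload : String) (max_lines : Int) (max_line_len : Int) (out : List String × Int × Int) : Decidable (Spec_apply_paste lines cursor_x cursor_y payload max_lines max_line_len out) := by unfold Spec_apply_paste; infer_instance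

-- ===== CLAIM (what is proved, stated in full; the proofs are below) =====
def Claim_equal_apply_paste : Prop := ∀ (lines : List String) (cursor_x : Int) (cursor_y : Int) (payload : String) (max_lines : Int) (max_line_len : Int), Dom_apply_paste lines cursor_x cursor_y payload max_lines max_line_len → Pre_apply_paste lines cursor_x cursor_y payload max_lines max_line_len → Spec_apply_paste lines cursor_x cursor_y payload max_lines max_line_len (apply_paste lines cursor_x cursor_y payload max_lines max_line_len)

-- ===== LEMMAS AND PROOFS =====

-- splicing one character at position x and then looking just before / just after it
theorem pv_take_ins (l : List Char) (x : Nat) (c : Char) :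
    (l.take x ++ [c] ++ l.drop x).take (x+1) = l.take x ++ [c] := by
  rw [List.append_assoc, List.take_append]
  have h1 : (l.take x).length = min x l.length := by simp
  rw [List.take_of_length_le (by omega)]
  congr 1
  rcases le_or_gt x l.length with h | h
  · have : x + 1 - (l.take x).length = 1 := by omega
    rw [this]; simp
  · have hd : l.drop x = [] := by rw [List.drop_eq_nil_iff]; omega
    rw [hd]; simp; omega

theorem pv_drop_ins (l : List Char) (x : Nat) (c : Char) :
    (l.take x ++ [c] ++ l.drop x).drop (x+1) = l.drop x := by
  rw [List.append_assoc, List.drop_append]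
  have h1 : (l.take x).length = min x l.length := by simp
  have h2 : (l.take x).drop (x+1) = [] := by rw [List.drop_eq_nil_iff]; omega
  rw [h2, List.nil_append]
  rcases le_or_gt x l.length with h | h
  · have : x + 1 - (l.take x).length = 1 := by omega
    rw [this]; simp
  · have hd : l.drop x = [] := by rw [List.drop_eq_nil_iff]; omega
    rw [hd]
    have : ([c] : List Char).drop (x + 1 - (l.take x).length) = [] := by
      rw [List.drop_eq_nil_iff]; simp; omega
    simpa using this

theorem pv_len_ins (l : List Char) (x : Nat) (c : Char) :
    (l.take x ++ [c] ++ l.drop x).length = l.length + 1 := by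
  simp

-- A's set-then-insert line split equals B's single slice assignment
theorem pvSplit_eq (out : List String) (y : Nat) (hy : y < out.length) (a b : String) :
    PySem.List.insert (PySem.List.pySetD out (y : Int) a) ((y : Int) + 1) b =
      PySem.List.slice out none (some (y : Int)) ++ [a, b] ++ PySem.List.slice out (some ((y : Int) + 1)) none := by
  have hc : ((y : Int) + 1) = (((y + 1 : Nat)) : Int) := by push_cast; ring
  rw [PySem.List.pySetD_natCast, hc, PySem.List.slice_to_natCast, PySem.List.slice_from_natCast,
    PySem.List.insert_natCast _ _ _ (by simp; omega)]
  rw [List.set_eq_take_append_cons_drop, if_pos hy]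
  have hlen : (out.take y).length = y := by simp; omega
  rw [List.take_append, List.drop_append, hlen]
  have h1 : y + 1 - y = 1 := by omega
  have h2 : (out.take y).take (y+1) = out.take y := List.take_of_length_le (by omega)
  have h3 : (out.take y).drop (y+1) = [] := List.drop_of_length_le (by omega)
  rw [h1, h2, h3]
  simp

theorem pvSplit_len (out : List String) (y : Nat) (hy : y < out.length) (a b : String) :
    (PySem.List.slice out none (some (y : Int)) ++ [a, b] ++ PySem.List.slice out (some ((y : Int) + 1)) none).length = out.length + 1 := by
  have hc : ((y : Int) + 1) = (((y + 1 : Nat)) : Int) := by push_cast; ring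
  rw [hc, PySem.List.slice_to_natCast, PySem.List.slice_from_natCast]
  simp
  omega

theorem pvRunInsert_length (out : List String) (cx cy : Int) (seg : List Char) (maxLen : Int) :
    (pvRunInsert out cx cy seg maxLen).1.length = out.length := by
  simp only [pvRunInsert]
  split_ifs <;> simp [PySem.List.length_pySetD]

theorem pvRunInsert_cx (out : List String) (cx cy : Int) (seg : List Char) (maxLen : Int) (hx : 0 ≤ cx) :
    0 ≤ (pvRunInsert out cx cy seg maxLen).2 := by
  simp only [pvRunInsert]
  split_ifs with h
  · dsimp only
    omega
  · exact hx

-- inserting one character per-char and then batching the remaining segment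
-- is the same as batching the whole segment at once
theorem pvRunInsert_step (out : List String) (x y : Nat) (hy : y < out.length) (c : Char)
    (seg' : List Char) (maxLen : Int)
    (hfit : (((out.getD y "").toList.length : Int)) < maxLen - 1) :
    pvRunInsert (out.set y (String.ofList ((out.getD y "").toList.take x ++ [c] ++ (out.getD y "").toList.drop x))) ((x : Int) + 1) (y : Int) seg' maxLen
      = pvRunInsert out (x : Int) (y : Int) (c :: seg') maxLen := by
  have hget : (out.set y (String.ofList ((out.getD y "").toList.take x ++ [c] ++ (out.getD y "").toList.drop x))).getD y "" = String.ofList ((out.getD y "").toList.take x ++ [c] ++ (out.getD y "").toList.drop x) := by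
    rw [List.getD_eq_getElem _ _ (by simpa using hy)]
    simp
  have hcast : ((x : Int) + 1) = (((x + 1 : Nat)) : Int) := by push_cast; ring
  simp only [pvRunInsert, PySem.List.pyGetD_natCast, PySem.List.pySetD_natCast, hget,
    String.toList_ofList, pv_len_ins, hcast, PySem.List.slice_to_natCast,
    PySem.List.slice_from_natCast, pv_take_ins, pv_drop_ins, List.set_set]
  set line := (out.getD y "").toList with hline
  have hpos : 0 < maxLen - 1 - (line.length : Int) := by omega
  rw [if_pos hpos]
  by_cases h1 : 0 < maxLen - 1 - ((line.length + 1 : Nat) : Int)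
  · rw [if_pos h1]
    have hins : PySem.List.slice (c :: seg') none (some (maxLen - 1 - (line.length : Int))) =
        c :: PySem.List.slice seg' none (some (maxLen - 1 - ((line.length + 1 : Nat) : Int))) := by
      rw [PySem.List.slice_to _ (le_of_lt hpos), PySem.List.slice_to _ (le_of_lt h1)]
      have h2 : (maxLen - 1 - (line.length : Int)).toNat = (maxLen - 1 - ((line.length + 1 : Nat) : Int)).toNat + 1 := by
        push_cast; omega
      rw [h2, List.take_succ_cons]
    rw [hins]
    simp [List.append_assoc]
    ring
  · rw [if_neg h1]
    have he : maxLen - 1 - (line.length : Int) = 1 := by push_cast at h1; omega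
    rw [he]
    have hc1 : PySem.List.slice (c :: seg') none (some (1 : Int)) = [c] := by
      rw [PySem.List.slice_to _ (by norm_num)]
      simp
    rw [hc1]
    simp

-- A's per-character loop over a CR-free segment is B's single batched insert
theorem pvRun_lemma (maxL maxLen : Int) (rest : List Char) (seg : List Char) (hseg : ∀ c ∈ seg, c ≠ '\r')
    (out : List String) (cx cy : Int) (hx : 0 ≤ cx) (hy : 0 ≤ cy) (hylt : cy < (out.length : Int)) :
    pvApplyA maxL maxLen (seg ++ rest) out cx cy =
      pvApplyA maxL maxLen rest (pvRunInsert out cx cy seg maxLen).1 (pvRunInsert out cx cy seg maxLen).2 cy := by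
  induction seg generalizing out cx with
  | nil =>
    have hnil : pvRunInsert out cx cy [] maxLen = (out, cx) := by
      simp only [pvRunInsert]
      split_ifs with h
      · have hyy : cy = ((cy.toNat : Nat) : Int) := by omega
        have hxx : cx = ((cx.toNat : Nat) : Int) := by omega
        have hylt' : cy.toNat < out.length := by omega
        rw [hyy, hxx]
        rw [PySem.List.pySetD_natCast, PySem.List.pyGetD_natCast]
        have hsl : ∀ b : Int, PySem.List.slice ([] : List Char) none (some b) = [] := by
          intro b; simp [PySem.List.slice]
        rw [hsl, List.append_nil, PySem.List.slice_to_natCast, PySem.List.slice_from_natCast,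
          List.take_append_drop, String.ofList_toList, List.getD_eq_getElem _ _ hylt']
        simp
      · rfl
    rw [hnil]
    simp
  | cons c seg' ih =>
    have hc : c ≠ '\r' := hseg c (by simp)
    have hyy : cy = ((cy.toNat : Nat) : Int) := by omega
    have hxx : cx = ((cx.toNat : Nat) : Int) := by omega
    rw [List.cons_append, pvApplyA, if_neg hc]
    by_cases hfull : maxLen - 1 ≤ (((PySem.List.pyGetD out cy "").toList.length : Nat) : Int)
    · rw [if_pos hfull]
      have hstop : pvRunInsert out cx cy (c :: seg') maxLen = (out, cx) := by
        simp only [pvRunInsert]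
        rw [if_neg (by simp at hfull ⊢; omega)]
      have hstop' : pvRunInsert out cx cy seg' maxLen = (out, cx) := by
        simp only [pvRunInsert]
        rw [if_neg (by simp at hfull ⊢; omega)]
      rw [hstop, ih (fun d hd => hseg d (by simp [hd])) out cx hx hylt, hstop']
    · rw [if_neg hfull]
      have hylt' : cy.toNat < out.length := by omega
      have hfit : (((out.getD cy.toNat "").toList.length : Nat) : Int) < maxLen - 1 := by
        rw [hyy] at hfull
        simp only [PySem.List.pyGetD_natCast] at hfull
        omega
      set out1 := PySem.List.pySetD out cy (String.ofList (PySem.List.slice (PySem.List.pyGetD out cy "").toList none (some cx) ++ [c] ++ PySem.List.slice (PySem.List.pyGetD out cy "").toList (some cx) none)) with hout1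
      have hout1' : out1 = out.set cy.toNat (String.ofList ((out.getD cy.toNat "").toList.take cx.toNat ++ [c] ++ (out.getD cy.toNat "").toList.drop cx.toNat)) := by
        rw [hout1, hyy, hxx, PySem.List.pySetD_natCast, PySem.List.pyGetD_natCast,
          PySem.List.slice_to_natCast, PySem.List.slice_from_natCast]
        simp only [Int.toNat_natCast]
      have hlen1 : out1.length = out.length := by rw [hout1']; simp
      rw [ih (fun d hd => hseg d (by simp [hd])) out1 (cx + 1) (by omega) (by omega)]
      have hstep : pvRunInsert out1 (cx + 1) cy seg' maxLen = pvRunInsert out cx cy (c :: seg') maxLen := by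
        rw [hout1', hyy, hxx]
        exact pvRunInsert_step out cx.toNat cy.toNat hylt' c seg' maxLen hfit
      rw [hstep]

theorem pvMain (maxL maxLen : Int) (n : Nat) (cs : List Char) (hn : cs.length ≤ n)
    (out : List String) (cx cy : Int) (hx : 0 ≤ cx) (hy : 0 ≤ cy) (hylt : cy < (out.length : Int)) :
    pvApplyA maxL maxLen cs out cx cy = pvApplyB maxL maxLen cs out cx cy := by
  induction n generalizing cs out cx cy with
  | zero =>
    have : cs = [] := List.length_eq_zero_iff.mp (Nat.le_zero.mp hn)
    subst this
    simp [pvApplyA, pvApplyB]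
  | succ n ih =>
    match cs with
    | [] => simp [pvApplyA, pvApplyB]
    | c :: cs =>
      by_cases hc : c = '\r'
      · subst hc
        rw [pvApplyA, pvApplyB, if_pos rfl, if_pos rfl]
        by_cases hbreak : maxL ≤ (out.length : Int)
        · rw [if_pos hbreak, if_pos hbreak]
        · rw [if_neg hbreak, if_neg hbreak]
          have hyy : cy = ((cy.toNat : Nat) : Int) := by omega
          have hylt' : cy.toNat < out.length := by omega
          have hAB : PySem.List.insert (PySem.List.pySetD out cy (String.ofList (PySem.List.slice (PySem.List.pyGetD out cy "").toList none (some cx)))) (cy + 1) (String.ofList (PySem.List.slice (PySem.List.pyGetD out cy "").toList (some cx) none))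
              = PySem.List.slice out none (some cy)
                ++ [String.ofList (PySem.List.slice (PySem.List.pyGetD out cy "").toList none (some cx)), String.ofList (PySem.List.slice (PySem.List.pyGetD out cy "").toList (some cx) none)]
                ++ PySem.List.slice out (some (cy + 1)) none := by
            rw [hyy]
            exact pvSplit_eq out cy.toNat hylt' _ _
          dsimp only
          rw [hAB]
          apply ih cs (by simpa using hn)
          · omega
          · omega
          · rw [hyy]
            rw [pvSplit_len out cy.toNat hylt' _ _]
            push_cast
            omega
      · rw [pvApplyB, if_neg hc]
        have hsplit : c :: cs = (c :: cs.takeWhile (· ≠ '\r')) ++ cs.dropWhile (· ≠ '\r') := by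
          rw [List.cons_append, List.takeWhile_append_dropWhile]
        have hseg : ∀ d ∈ c :: cs.takeWhile (· ≠ '\r'), d ≠ '\r' := by
          intro d hd
          rcases List.mem_cons.mp hd with h | h
          · subst h; exact hc
          · have := List.mem_takeWhile_imp h
            simpa using this
        conv_lhs => rw [hsplit]
        rw [pvRun_lemma maxL maxLen _ _ hseg out cx cy hx hy hylt]
        apply ih
        · have h1 : (cs.dropWhile (· ≠ '\r')).length ≤ cs.length :=
            (cs.dropWhile_sublist (p := (· ≠ '\r'))).length_le
          simp at hn
          omega
        · exact pvRunInsert_cx out cx cy _ maxLen hx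
        · exact hy
        · rw [pvRunInsert_length]; exact hylt


-- ===== VERDICT (by name: the statement is the Claim_ definition above) =====
theorem apply_paste_spec : Claim_equal_apply_paste := by
  intro lines cx cy payload maxL maxLen _hd hpre
  unfold Spec_apply_paste apply_paste apply_paste_alt
  rcases hpre with ⟨hx, hy, hylt⟩ | hemp | ⟨hcr, hml⟩
  · exact pvMain maxL maxLen payload.toList.length payload.toList le_rfl lines cx cy hx hy hylt
  · subst hemp
    simp [pvApplyA, pvApplyB]
  · rw [PySem.Str.startswith_eq] at hcr
    have hpre' : ('\r' :: ([] : List Char)) <+: payload.toList := by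
      have : ("\r" : String).toList = ['\r'] := by decide
      rw [PySem.Chars.startswith_iff] at hcr
      simpa [this] using hcr
    obtain ⟨t, ht⟩ := hpre'
    rw [← ht]
    show pvApplyA maxL maxLen ('\r' :: t) lines cx cy = pvApplyB maxL maxLen ('\r' :: t) lines cx cy
    rw [pvApplyA, pvApplyB]
    simp [hml]
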